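-- pv_equiv track=rewrite | github.com/lkhedlund/python-practice | course-assignments/full3/full3_v07.py | positive_v
-- ===== SOURCE A (Python) =====
-- EOF = chr(4)           # A standard End-Of-File character (ascii value 4)
--
-- TAB_CHAR = chr(187)     # A ">>" character (as a single character) in the extended ascii set
--
-- SPACE_CHAR = chr(183)   # A raised dot character in the extended ascii set
--
-- NEWLINE_CHAR = chr(182) # A backwards P character in the extended ascii set
--
-- def positive_v(line):
--     new_line = ""
--     if line != EOF:
--         for ch in line:
--             if ch == chr(32):
--                 new_line += ch.replace(chr(32), SPACE_CHAR)
--             elif ch == chr(9):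
--                 new_line += ch.replace(chr(9), TAB_CHAR) + chr(9)
--             else:
--                 new_line += ch
--         line = new_line.rstrip() + NEWLINE_CHAR
--         return line
--     else:
--         return line
-- ===== SOURCE B (Python) =====
-- EOF = chr(4)
-- TAB_CHAR = chr(187)
-- SPACE_CHAR = chr(183)
-- NEWLINE_CHAR = chr(182)
--
-- def positive_v(line):
--     # Single right-to-left pass: while still in the line's trailing-whitespace
--     # zone, whitespace that would end up stripped is dropped at once (a tab
--     # contributes only its TAB_CHAR marker), so no rstrip pass is needed.
--     out = []
--     if line != EOF:
--         stripping = True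
--         for ch in reversed(line):
--             if stripping:
--                 if ch == chr(9):
--                     out.append(TAB_CHAR)
--                     stripping = False
--                 elif ch == chr(32):
--                     out.append(SPACE_CHAR)
--                     stripping = False
--                 elif ch.isspace():
--                     continue
--                 else:
--                     out.append(ch)
--                     stripping = False
--             else:
--                 if ch == chr(32):
--                     out.append(SPACE_CHAR)
--                 elif ch == chr(9):
--                     out.append(chr(9))
--                     out.append(TAB_CHAR)
--                 else:
--                     out.append(ch)
--         out.reverse()
--         out.append(NEWLINE_CHAR)
--         return "".join(out)
--     else:
--         return line
-- ===== Notes on version B (the rewrite author's own statement) =====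
-- stated objective: alternative
-- what changed: B replaces A's left-to-right substitute-then-rstrip two-stage pipeline with a single right-to-left pass carrying a stripping flag that decides on the fly which trailing whitespace would have been stripped (a trailing tab contributes only its marker), building the output back-to-front and reversing once; no rstrip pass exists in B.
import Mathlib
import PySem

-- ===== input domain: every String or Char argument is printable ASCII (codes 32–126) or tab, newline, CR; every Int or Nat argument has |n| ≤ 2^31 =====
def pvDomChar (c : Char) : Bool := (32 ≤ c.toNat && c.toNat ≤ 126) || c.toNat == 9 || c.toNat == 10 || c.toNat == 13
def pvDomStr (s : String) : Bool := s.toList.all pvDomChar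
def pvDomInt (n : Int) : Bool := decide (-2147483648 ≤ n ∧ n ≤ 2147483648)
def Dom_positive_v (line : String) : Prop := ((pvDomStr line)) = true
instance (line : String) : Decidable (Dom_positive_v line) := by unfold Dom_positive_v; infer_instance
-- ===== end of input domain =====

-- B is an alternative algorithm: one right-to-left pass with a stripping flag that
-- drops would-be-rstripped trailing whitespace on the fly, instead of A's
-- substitute-everything-then-rstrip pipeline.

-- ===== PORT A =====
-- A's loop body: the three branches in order, appending to the accumulator.
def pvA_step (acc : List Char) (ch : Char) : List Char :=
  if ch = Char.ofNat 32 then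
    acc ++ PySem.Chars.replace [ch] [Char.ofNat 32] [Char.ofNat 183]
  else if ch = Char.ofNat 9 then
    acc ++ PySem.Chars.replace [ch] [Char.ofNat 9] [Char.ofNat 187] ++ [Char.ofNat 9]
  else
    acc ++ [ch]

def positive_v (line : String) : String :=
  if line ≠ String.ofList [Char.ofNat 4] then
    String.ofList (PySem.Chars.rstrip (line.toList.foldl pvA_step []) ++ [Char.ofNat 182])
  else line

-- ===== PORT B =====
-- B's loop body over the REVERSED line: state = (out so far, still-stripping flag).
def pvB_step (st : List Char × Bool) (ch : Char) : List Char × Bool :=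
  if st.2 then
    if ch = Char.ofNat 9 then (st.1 ++ [Char.ofNat 187], false)
    else if ch = Char.ofNat 32 then (st.1 ++ [Char.ofNat 183], false)
    else if PySem.Chars.isspace ch then (st.1, true)
    else (st.1 ++ [ch], false)
  else
    if ch = Char.ofNat 32 then (st.1 ++ [Char.ofNat 183], false)
    else if ch = Char.ofNat 9 then (st.1 ++ [Char.ofNat 9, Char.ofNat 187], false)
    else (st.1 ++ [ch], false)

def positive_v_alt (line : String) : String :=
  if line ≠ String.ofList [Char.ofNat 4] then
    String.ofList ((line.toList.reverse.foldl pvB_step ([], true)).1.reverse ++ [Char.ofNat 182])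
  else line

-- ===== PRECONDITION & SPEC =====
def Spec_positive_v (line : String) (out : String) : Prop := out = positive_v_alt line
instance (line : String) (out : String) : Decidable (Spec_positive_v line out) := by unfold Spec_positive_v; infer_instance

-- ===== CLAIM (what is proved, stated in full; the proofs are below) =====
def Claim_equal_positive_v : Prop := ∀ (line : String), Dom_positive_v line → Spec_positive_v line (positive_v line)

-- ===== LEMMAS AND PROOFS =====
-- Per-character translation of A's loop, and its reversed form.
def pvTr (c : Char) : List Char :=
  if c = Char.ofNat 32 then [Char.ofNat 183]
  else if c = Char.ofNat 9 then [Char.ofNat 187, Char.ofNat 9]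
  else [c]

def pvTrR (c : Char) : List Char :=
  if c = Char.ofNat 32 then [Char.ofNat 183]
  else if c = Char.ofNat 9 then [Char.ofNat 9, Char.ofNat 187]
  else [c]

-- The output (reversed) that B's stripping phase produces on a reversed line.
def pvG : List Char → List Char
  | [] => []
  | c :: rest =>
    if c = Char.ofNat 9 then Char.ofNat 187 :: rest.flatMap pvTrR
    else if c = Char.ofNat 32 then Char.ofNat 183 :: rest.flatMap pvTrR
    else if PySem.Chars.isspace c then pvG rest
    else c :: rest.flatMap pvTrR

theorem pvA_step_eq (acc : List Char) (ch : Char) : pvA_step acc ch = acc ++ pvTr ch := by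
  unfold pvA_step pvTr
  by_cases h32 : ch = Char.ofNat 32
  · subst h32; simp; decide
  · by_cases h9 : ch = Char.ofNat 9
    · subst h9; simp [h32]; decide
    · simp [h32, h9]

theorem pvA_fold_eq (cs : List Char) :
    cs.foldl pvA_step [] = cs.flatMap pvTr := by
  have key : ∀ (cs acc : List Char), cs.foldl pvA_step acc = acc ++ cs.flatMap pvTr := by
    intro cs
    induction cs with
    | nil => intro acc; simp [List.foldl]
    | cons c cs ih =>
        intro acc
        simp only [List.foldl, pvA_step_eq, ih, List.flatMap_cons, List.append_assoc]
  simpa using key cs []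

theorem pvTr_reverse (c : Char) : (pvTr c).reverse = pvTrR c := by
  unfold pvTr pvTrR; split_ifs <;> rfl

theorem pvFlat_reverse (cs : List Char) :
    (cs.flatMap pvTr).reverse = cs.reverse.flatMap pvTrR := by
  induction cs with
  | nil => rfl
  | cons c cs ih =>
      simp only [List.flatMap_cons, List.reverse_append, ih, List.reverse_cons,
        List.flatMap_append, List.flatMap_cons, List.flatMap_nil, List.append_nil,
        pvTr_reverse]

theorem pvTrR_9 : pvTrR (Char.ofNat 9) = [Char.ofNat 9, Char.ofNat 187] := by decide
theorem pvTrR_32 : pvTrR (Char.ofNat 32) = [Char.ofNat 183] := by decide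
theorem pvTrR_other (c : Char) (h32 : ¬ c = Char.ofNat 32) (h9 : ¬ c = Char.ofNat 9) :
    pvTrR c = [c] := by simp [pvTrR, h32, h9]
theorem pvSp183 : PySem.Chars.isspace (Char.ofNat 183) = false := by decide
theorem pvSp187 : PySem.Chars.isspace (Char.ofNat 187) = false := by decide
theorem pvSp9 : PySem.Chars.isspace (Char.ofNat 9) = true := by decide

theorem pvB_fold_false (l : List Char) (acc : List Char) :
    l.foldl pvB_step (acc, false) = (acc ++ l.flatMap pvTrR, false) := by
  induction l generalizing acc with
  | nil => simp [List.foldl]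
  | cons c l ih =>
      simp only [List.foldl, pvB_step]
      by_cases h32 : c = Char.ofNat 32
      · subst h32; simp [ih, pvTrR_32, List.append_assoc]
      · by_cases h9 : c = Char.ofNat 9
        · subst h9; simp [h32, ih, pvTrR_9, List.append_assoc]
        · simp [h32, h9, ih, pvTrR_other c h32 h9, List.append_assoc]

theorem pvB_fold_true (l : List Char) (acc : List Char) :
    (l.foldl pvB_step (acc, true)).1 = acc ++ pvG l := by
  induction l generalizing acc with
  | nil => simp [List.foldl, pvG]
  | cons c l ih =>
      simp only [List.foldl, pvB_step, pvG]
      by_cases h9 : c = Char.ofNat 9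
      · subst h9; simp [pvB_fold_false, List.append_assoc]
      · by_cases h32 : c = Char.ofNat 32
        · subst h32; simp [h9, pvB_fold_false, List.append_assoc]
        · by_cases hsp : PySem.Chars.isspace c = true
          · simp [h9, h32, hsp, ih]
          · simp [h9, h32, hsp, pvB_fold_false, List.append_assoc]

theorem pvDrop_eq (l : List Char) :
    (l.flatMap pvTrR).dropWhile PySem.Chars.isspace = pvG l := by
  induction l with
  | nil => rfl
  | cons c l ih =>
      simp only [List.flatMap_cons, pvG]
      by_cases h32 : c = Char.ofNat 32
      · subst h32
        have h9 : ¬ Char.ofNat 32 = Char.ofNat 9 := by decide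
        simp [h9, pvTrR_32, pvSp183]
      · by_cases h9 : c = Char.ofNat 9
        · subst h9
          simp [pvTrR_9, pvSp9, pvSp187]
        · by_cases hsp : PySem.Chars.isspace c = true
          · simp [h32, h9, pvTrR_other c h32 h9, hsp, ih]
          · simp [h32, h9, pvTrR_other c h32 h9, hsp]

theorem pv_core (cs : List Char) :
    PySem.Chars.rstrip (cs.foldl pvA_step []) =
      (cs.reverse.foldl pvB_step ([], true)).1.reverse := by
  have hr : PySem.Chars.rstrip (cs.flatMap pvTr)
      = ((cs.flatMap pvTr).reverse.dropWhile PySem.Chars.isspace).reverse := rfl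
  rw [pvA_fold_eq, hr, pvFlat_reverse, pvDrop_eq, pvB_fold_true]
  simp

-- ===== VERDICT (by name: the statement is the Claim_ definition above) =====
theorem positive_v_spec : Claim_equal_positive_v := by
  intro line _
  unfold Spec_positive_v positive_v positive_v_alt
  by_cases h : line = String.ofList [Char.ofNat 4]
  · simp [h]
  · simp [h, pv_core]
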